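-- pv_equiv track=rewrite | github.com/dojorio/dojo_niteroi | 2011/20110210_python_luz_corredor/corredor.py | anda_corredor
-- ===== SOURCE A (Python) =====
-- import itertools
--
-- class Lampada(object):
--
--     def __init__(self, ligada=False):
--         self.ligada = ligada
--
--     @property
--     def estado(self):
--         return 'on' if self.ligada else 'off'
--
--     def aberta_botao(self):
--         self.ligada = not self.ligada
--
-- def anda_corredor(numero_de_lampadas):
--     lista_de_numero_de_lampadas = range(numero_de_lampadas)
--
--     lampadas = []
--     for i in lista_de_numero_de_lampadas:
--         lampadas.append(Lampada())
--
--     caminhada_lampada = itertools.product(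
--         lista_de_numero_de_lampadas, lista_de_numero_de_lampadas
--     )
--
--     for caminhada, lampada in caminhada_lampada:
--         if not ((lampada + 1) % (caminhada + 1)):
--             lampadas[lampada].aberta_botao()
--
--     return [l.estado for l in lampadas]
-- ===== SOURCE B (Python) =====
-- def anda_corredor(numero_de_lampadas):
--     # Lamp i ends on iff it is toggled an odd number of times, i.e. iff
--     # i+1 has an odd number of divisors, i.e. iff i+1 is a perfect square.
--     estados = []
--     raiz = 1
--     for k in range(1, numero_de_lampadas + 1):
--         if raiz * raiz == k:
--             estados.append('on')
--             raiz += 1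
--         else:
--             estados.append('off')
--     return estados
-- ===== Notes on version B (the rewrite author's own statement) =====
-- stated objective: faster
-- what changed: Replaces the O(n^2) double loop that toggles every lamp for every walk with a single O(n) pass that marks lamp k on exactly when k is the next perfect square, tracked by a running square root counter.
import Mathlib
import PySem

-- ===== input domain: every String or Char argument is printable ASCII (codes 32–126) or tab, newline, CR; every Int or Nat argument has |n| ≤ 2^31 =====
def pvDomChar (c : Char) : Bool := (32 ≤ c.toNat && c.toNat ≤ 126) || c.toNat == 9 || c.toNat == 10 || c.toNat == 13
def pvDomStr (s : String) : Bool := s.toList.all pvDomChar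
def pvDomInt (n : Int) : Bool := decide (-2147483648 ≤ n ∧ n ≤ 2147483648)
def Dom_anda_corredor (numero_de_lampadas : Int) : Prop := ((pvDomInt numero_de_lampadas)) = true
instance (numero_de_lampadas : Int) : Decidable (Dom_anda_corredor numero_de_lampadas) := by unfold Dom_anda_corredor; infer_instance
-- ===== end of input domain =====

-- B replaces A's O(n²) toggle-every-divisor double loop by one O(n) pass marking exactly the perfect squares (objective: faster).


-- ===== PORT A =====
-- The Lampada object holds one mutable Bool (ligada); it is ported as a Bool.
-- 'lampadas[lampada].aberta_botao()' toggles the element in place; 'lampada' is an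
-- element of range(n), hence a nonnegative in-range index, so '.toNat' is exact here.
-- itertools.product(lista, lista) iterated once = nested loops: outer caminhada, inner lampada.
def anda_corredor (numero_de_lampadas : Int) : List String :=
  let lista_de_numero_de_lampadas := PySem.List.pyRange 0 numero_de_lampadas 1
  let lampadas : List Bool :=
    lista_de_numero_de_lampadas.foldl (fun acc _ => acc ++ [false]) []
  let lampadas :=
    lista_de_numero_de_lampadas.foldl (fun lam caminhada =>
      lista_de_numero_de_lampadas.foldl (fun lam lampada =>
        if PySem.Int.mod (lampada + 1) (caminhada + 1) == 0 then
          lam.modify lampada.toNat (fun b => !b)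
        else lam) lam) lampadas
  lampadas.map (fun l => if l then "on" else "off")

-- ===== PORT B =====
def anda_corredor_alt (numero_de_lampadas : Int) : List String :=
  ((PySem.List.pyRange 1 (numero_de_lampadas + 1) 1).foldl
    (fun (st : List String × Int) k =>
      if st.2 * st.2 == k then (st.1 ++ ["on"], st.2 + 1) else (st.1 ++ ["off"], st.2))
    ([], 1)).1

-- ===== PRECONDITION & SPEC =====
def Spec_anda_corredor (numero_de_lampadas : Int) (out : List String) : Prop := out = anda_corredor_alt numero_de_lampadas
instance (numero_de_lampadas : Int) (out : List String) : Decidable (Spec_anda_corredor numero_de_lampadas out) := by unfold Spec_anda_corredor; infer_instance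

-- ===== CLAIM (what is proved, stated in full; the proofs are below) =====
def Claim_equal_anda_corredor : Prop := ∀ (numero_de_lampadas : Int), Dom_anda_corredor numero_de_lampadas → Spec_anda_corredor numero_de_lampadas (anda_corredor numero_de_lampadas)

-- ===== LEMMAS AND PROOFS =====

-- the common reference value both ports are shown to equal
def pvRef (j : Nat) : String := if Nat.sqrt (j + 1) * Nat.sqrt (j + 1) = j + 1 then "on" else "off"
def pvRefList (N : Nat) : List String := (List.range N).map pvRef

-- ---- A side ----

-- proof-side names for the port's loop bodies (definitional)
def andaStep (c : Int) (lam : List Bool) (lampada : Int) : List Bool :=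
  if PySem.Int.mod (lampada + 1) (c + 1) == 0 then lam.modify lampada.toNat (fun b => !b) else lam
def andaOuter (l : List Int) (lam : List Bool) (c : Int) : List Bool := l.foldl (andaStep c) lam
def andaInit (l : List Int) : List Bool := l.foldl (fun acc _ => acc ++ [false]) []

lemma A_unfold (n : Int) : anda_corredor n =
    ((PySem.List.pyRange 0 n 1).foldl (andaOuter (PySem.List.pyRange 0 n 1))
      (andaInit (PySem.List.pyRange 0 n 1))).map (fun l => if l then "on" else "off") := rfl

-- the toggle condition, as a Bool predicate on the Int loop variables
def qI (c : Int) (j : Nat) : Bool := PySem.Int.mod ((j : Int) + 1) (c + 1) == 0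

lemma getElem?_modify' (L : List Bool) (i j : Nat) (f : Bool → Bool) :
    (L.modify i f)[j]? = if i = j then L[j]?.map f else L[j]? := by
  rcases Nat.lt_trichotomy i j with h | h | h
  · rw [List.getElem?_modify]; simp [Nat.ne_of_lt h]
  · subst h; rw [List.getElem?_modify]; simp
  · rw [List.getElem?_modify]; simp [Nat.ne_of_gt h]

lemma andaStep_len (c : Int) (lam : List Bool) (i : Int) : (andaStep c lam i).length = lam.length := by
  unfold andaStep; split <;> simp [List.length_modify]

lemma tog_len (c : Int) (js : List Int) (L : List Bool) :
    (js.foldl (andaStep c) L).length = L.length := by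
  induction js generalizing L with
  | nil => rfl
  | cons i js ih => simp only [List.foldl_cons, ih, andaStep_len]

lemma tog_get (c : Int) (js : List Int) (hnd : js.Nodup) (hpos : ∀ x ∈ js, 0 ≤ x)
    (L : List Bool) (j : Nat) :
    (js.foldl (andaStep c) L)[j]? =
      if (j : Int) ∈ js ∧ qI c j then L[j]?.map (fun b => !b) else L[j]? := by
  induction js generalizing L with
  | nil => simp
  | cons i js ih =>
      rcases List.nodup_cons.mp hnd with ⟨hi, hnd'⟩
      have hpos' : ∀ x ∈ js, 0 ≤ x := fun x hx => hpos x (List.mem_cons_of_mem _ hx)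
      have hipos : 0 ≤ i := hpos i List.mem_cons_self
      simp only [List.foldl_cons]
      rw [ih hnd' hpos']
      by_cases hji : (j : Int) = i
      · subst hji
        have hmem : ¬ (j : Int) ∈ js := hi
        simp only [hmem, false_and, if_false]
        unfold andaStep qI
        simp only [Int.toNat_natCast]
        by_cases hp : (PySem.Int.mod ((j : Int) + 1) (c + 1) == 0) = true
        · simp [hp, List.mem_cons]
        · simp [hp, List.mem_cons]
      · have hLj : (andaStep c L i)[j]? = L[j]? := by
          unfold andaStep; split
          · rw [getElem?_modify']
            have hne : ¬ i.toNat = j := by omega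
            simp [hne]
          · rfl
        rw [hLj]
        simp [List.mem_cons, hji]

lemma outer_len (n : Int) (cs : List Int) (L : List Bool) :
    (cs.foldl (andaOuter (PySem.List.pyRange 0 n 1)) L).length = L.length := by
  induction cs generalizing L with
  | nil => rfl
  | cons c cs ih => simp only [List.foldl_cons, ih, andaOuter, tog_len]

lemma outer_get (n : Int) (cs : List Int) (L : List Bool) (j : Nat) (hj : (j : Int) < n) :
    (cs.foldl (andaOuter (PySem.List.pyRange 0 n 1)) L)[j]? =
      L[j]?.map (fun b => xor b (decide ((cs.countP (fun c => qI c j)) % 2 = 1))) := by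
  induction cs generalizing L with
  | nil =>
      simp only [List.foldl_nil, List.countP_nil]
      cases L[j]? <;> simp
  | cons c cs ih =>
      simp only [List.foldl_cons]
      rw [ih]
      show ((PySem.List.pyRange 0 n 1).foldl (andaStep c) L)[j]?.map _ = _
      rw [tog_get c _ (PySem.List.nodup_pyRange_one 0 n)
        (fun x hx => ((PySem.List.mem_pyRange_one).mp hx).1) L j]
      have hmem : (j : Int) ∈ PySem.List.pyRange 0 n 1 := by
        rw [PySem.List.mem_pyRange_one]; exact ⟨by omega, hj⟩
      simp only [hmem, true_and, List.countP_cons]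
      by_cases hp : qI c j
      · simp only [hp, if_pos, Option.map_map]
        congr 1
        funext b
        simp only [Function.comp]
        have hparity : ((cs.countP (fun c => qI c j) + 1) % 2 = 1) ↔
            ¬ ((cs.countP (fun c => qI c j)) % 2 = 1) := by omega
        by_cases hc : (cs.countP (fun c => qI c j)) % 2 = 1
        · simp only [hc, decide_true]
          have : ¬ ((cs.countP (fun c => qI c j) + 1) % 2 = 1) := by omega
          simp only [this, decide_false]
          cases b <;> rfl
        · simp only [hc, decide_false]
          have : (cs.countP (fun c => qI c j) + 1) % 2 = 1 := by omega
          simp only [this, decide_true]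
          cases b <;> rfl
      · simp [hp]

lemma countP_eq_card_filter_range (N : Nat) (p : Nat → Bool) :
    (List.range N).countP p = (Finset.filter (fun c => p c) (Finset.range N)).card := by
  induction N with
  | zero => simp
  | succ n ih =>
      rw [List.range_succ, Finset.range_add_one, List.countP_append, Finset.filter_insert]
      by_cases h : p n <;>
        simp [h, ih, Finset.card_insert_of_notMem]

lemma card_filter_divides (j N : Nat) (hj : j < N) :
    (Finset.filter (fun c => ((j + 1) % (c + 1) == 0 : Bool)) (Finset.range N)).card
      = (j + 1).divisors.card := by
  apply Finset.card_bij (fun c _ => c + 1)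
  · intro c hc
    simp only [Finset.mem_filter, Finset.mem_range, beq_iff_eq] at hc
    rw [Nat.mem_divisors]
    exact ⟨Nat.dvd_iff_mod_eq_zero.mpr hc.2, by omega⟩
  · intro a ha b hb hab; omega
  · intro d hd
    rw [Nat.mem_divisors] at hd
    have h1 : 1 ≤ d := Nat.pos_of_dvd_of_pos hd.1 (by omega)
    have h2 : d ≤ j + 1 := Nat.le_of_dvd (by omega) hd.1
    refine ⟨d - 1, ?_, by omega⟩
    simp only [Finset.mem_filter, Finset.mem_range, beq_iff_eq]
    constructor
    · omega
    · have hd1 : d - 1 + 1 = d := by omega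
      rw [hd1]
      exact Nat.dvd_iff_mod_eq_zero.mp hd.1

-- the classic fact: a positive number has an odd number of divisors iff it is a perfect square
lemma card_filter_lt_eq_card_filter_gt (m : Nat) (hm : 0 < m) :
    (m.divisors.filter (fun d => d * d < m)).card
      = (m.divisors.filter (fun d => m < d * d)).card := by
  apply Finset.card_bij (fun d _ => m / d)
  · intro d hd
    simp only [Finset.mem_filter, Nat.mem_divisors] at hd ⊢
    obtain ⟨⟨⟨e, he⟩, _⟩, hlt⟩ := hd
    have hd0 : 0 < d := Nat.pos_of_ne_zero (by rintro rfl; simp at he; omega)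
    have hde : d < e := by nlinarith
    have hdiv : m / d = e := by rw [he, Nat.mul_div_cancel_left _ hd0]
    rw [hdiv]
    refine ⟨⟨⟨d, by rw [he, Nat.mul_comm]⟩, by omega⟩, by nlinarith⟩
  · intro a ha b hb hab
    simp only [Finset.mem_filter, Nat.mem_divisors] at ha hb
    have h1 := Nat.div_div_self ha.1.1 (by omega)
    have h2 := Nat.div_div_self hb.1.1 (by omega)
    rw [← hab] at h2; omega
  · intro e he
    simp only [Finset.mem_filter, Nat.mem_divisors] at he
    obtain ⟨⟨⟨d, hd⟩, _⟩, hgt⟩ := he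
    have he0 : 0 < e := Nat.pos_of_ne_zero (by rintro rfl; simp at hd; omega)
    have hed : d < e := by nlinarith
    have hd0 : 0 < d := by
      rcases Nat.eq_zero_or_pos d with h | h
      · subst h; simp at hd; omega
      · exact h
    refine ⟨d, ?_, ?_⟩
    · simp only [Finset.mem_filter, Nat.mem_divisors]
      refine ⟨⟨⟨e, by rw [hd, Nat.mul_comm]⟩, by omega⟩, by nlinarith⟩
    · rw [hd, Nat.mul_comm, Nat.mul_div_cancel_left _ hd0]

lemma sqrt_mul_self' (d : Nat) : Nat.sqrt (d * d) = d := by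
  simp

lemma card_filter_sq (m : Nat) (hm : 0 < m) :
    (m.divisors.filter (fun d => d * d = m)).card
      = (if Nat.sqrt m * Nat.sqrt m = m then 1 else 0) := by
  by_cases hs : Nat.sqrt m * Nat.sqrt m = m
  · rw [if_pos hs]
    have hset : m.divisors.filter (fun d => d * d = m) = {Nat.sqrt m} := by
      ext d
      simp only [Finset.mem_filter, Nat.mem_divisors, Finset.mem_singleton]
      constructor
      · rintro ⟨_, hdd⟩
        have h := sqrt_mul_self' d
        rw [hdd] at h; omega
      · rintro rfl
        exact ⟨⟨⟨Nat.sqrt m, hs.symm⟩, by omega⟩, hs⟩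
    rw [hset, Finset.card_singleton]
  · rw [if_neg hs, Finset.card_eq_zero]
    ext d
    simp only [Finset.mem_filter, Nat.mem_divisors, Finset.notMem_empty, iff_false]
    rintro ⟨_, hdd⟩
    have h := sqrt_mul_self' d
    rw [hdd] at h
    exact hs (by rw [h, hdd])

lemma odd_card_divisors_iff (m : Nat) (hm : 0 < m) :
    (m.divisors.card % 2 = 1) ↔ Nat.sqrt m * Nat.sqrt m = m := by
  have h1 : (m.divisors.filter (fun d => d * d < m)).card
      + (m.divisors.filter (fun d => ¬ d * d < m)).card = m.divisors.card := by
    apply Finset.card_filter_add_card_filter_not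
  have h2 : ((m.divisors.filter (fun d => ¬ d * d < m)).filter (fun d => d * d = m)).card
      + ((m.divisors.filter (fun d => ¬ d * d < m)).filter (fun d => ¬ d * d = m)).card
      = (m.divisors.filter (fun d => ¬ d * d < m)).card := by
    apply Finset.card_filter_add_card_filter_not
  rw [Finset.filter_filter, Finset.filter_filter] at h2
  have e1 : m.divisors.filter (fun d => ¬ d * d < m ∧ d * d = m)
      = m.divisors.filter (fun d => d * d = m) := by
    apply Finset.filter_congr; intro d _
    constructor
    · intro h; exact h.2
    · intro h; exact ⟨by omega, h⟩
  have e2 : m.divisors.filter (fun d => ¬ d * d < m ∧ ¬ d * d = m)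
      = m.divisors.filter (fun d => m < d * d) := by
    apply Finset.filter_congr; intro d _
    constructor
    · intro h; omega
    · intro h; omega
  rw [e1, e2] at h2
  rw [card_filter_lt_eq_card_filter_gt m hm] at h1
  rw [card_filter_sq m hm] at h2
  by_cases hs : Nat.sqrt m * Nat.sqrt m = m <;> simp only [hs, if_true, if_false] at h2 <;>
    constructor <;> intro h <;> omega

lemma replicate_of_fold (l : List Int) (acc : List Bool) :
    l.foldl (fun acc _ => acc ++ [false]) acc = acc ++ List.replicate l.length false := by
  induction l generalizing acc with
  | nil => simp
  | cons x xs ih => simp [ih, List.replicate_succ]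

lemma andaInit_eq (n : Int) : andaInit (PySem.List.pyRange 0 n 1) = List.replicate n.toNat false := by
  unfold andaInit
  rw [replicate_of_fold]
  simp [PySem.List.length_pyRange_one]

lemma countP_pyRange (n : Int) (j : Nat) :
    (PySem.List.pyRange 0 n 1).countP (fun c => qI c j)
      = (List.range n.toNat).countP (fun c => (j + 1) % (c + 1) == 0) := by
  rw [PySem.List.pyRange_one, List.countP_map]
  have hsub : n - 0 = n := by ring
  rw [hsub]
  apply List.countP_congr
  intro k _
  simp only [Function.comp]
  unfold qI
  have h1 : (0 : Int) + (k : Int) + 1 = ((k + 1 : Nat) : Int) := by push_cast; ring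
  have h2 : ((j : Int) + 1) = ((j + 1 : Nat) : Int) := by push_cast; ring
  rw [h1, h2, PySem.Int.mod_natCast]
  simp only [beq_iff_eq]
  exact Int.natCast_eq_zero

lemma A_eq_ref (n : Int) : anda_corredor n = pvRefList n.toNat := by
  rw [A_unfold, andaInit_eq]
  apply List.ext_getElem?
  intro j
  rcases Nat.lt_or_ge j n.toNat with hj | hj
  · have hjn : (j : Int) < n := by omega
    rw [List.getElem?_map, outer_get n _ _ j hjn]
    have hrep : (List.replicate n.toNat false)[j]? = some false := by
      simp [hj]
    rw [hrep]
    simp only [Option.map_some, Bool.false_xor]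
    unfold pvRefList
    rw [List.getElem?_map, List.getElem?_range hj]
    simp only [Option.map_some]
    congr 1
    rw [countP_pyRange, countP_eq_card_filter_range, card_filter_divides j n.toNat hj]
    unfold pvRef
    by_cases hs : Nat.sqrt (j + 1) * Nat.sqrt (j + 1) = j + 1
    · rw [if_pos hs]
      have h := (odd_card_divisors_iff (j + 1) (by omega)).mpr hs
      simp [h]
    · rw [if_neg hs]
      have h : ¬ (j + 1).divisors.card % 2 = 1 :=
        fun h => hs ((odd_card_divisors_iff (j + 1) (by omega)).mp h)
      simp [h]
  · have h1 : (((PySem.List.pyRange 0 n 1).foldl (andaOuter (PySem.List.pyRange 0 n 1))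
        (List.replicate n.toNat false)).map (fun l => if l then "on" else "off"))[j]? = none := by
      rw [List.getElem?_eq_none]
      rw [List.length_map, outer_len, List.length_replicate]; exact hj
    have h2 : (pvRefList n.toNat)[j]? = none := by
      rw [List.getElem?_eq_none]
      unfold pvRefList
      rw [List.length_map, List.length_range]; exact hj
    rw [h1, h2]

-- ---- B side ----

lemma B_inv (t : Nat) :
    ((List.range t).map (fun k : Nat => 1 + (k : Int))).foldl
      (fun (st : List String × Int) k =>
        if st.2 * st.2 == k then (st.1 ++ ["on"], st.2 + 1) else (st.1 ++ ["off"], st.2))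
      ([], 1)
    = ((List.range t).map pvRef, ((Nat.sqrt t : Int) + 1)) := by
  induction t with
  | zero => simp
  | succ t ih =>
      rw [List.range_succ, List.map_append, List.foldl_append, ih, List.map_append]
      simp only [List.map_cons, List.map_nil, List.foldl_cons, List.foldl_nil]
      have ha1 := Nat.sqrt_le' t
      have ha2 := Nat.lt_succ_sqrt' t
      rw [Nat.pow_two] at ha1
      rw [Nat.succ_eq_add_one, Nat.pow_two] at ha2
      by_cases hs : (Nat.sqrt t + 1) * (Nat.sqrt t + 1) = t + 1
      · have hcond : (((Nat.sqrt t : Int) + 1) * ((Nat.sqrt t : Int) + 1) == 1 + (t : Int)) = true := by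
          rw [beq_iff_eq]
          have hcast : (((Nat.sqrt t + 1) * (Nat.sqrt t + 1) : Nat) : Int) = ((t + 1 : Nat) : Int) := by
            rw [hs]
          push_cast at hcast
          linarith
        rw [hcond]
        simp only [if_true]
        have hsq : Nat.sqrt (t + 1) = Nat.sqrt t + 1 := by
          rw [← hs, sqrt_mul_self']
        have hrefl : pvRef t = "on" := by
          unfold pvRef; rw [if_pos]; rw [hsq]; exact hs
        rw [hsq, hrefl]
        refine Prod.ext rfl ?_
        push_cast; ring
      · have hcond : (((Nat.sqrt t : Int) + 1) * ((Nat.sqrt t : Int) + 1) == 1 + (t : Int)) = false := by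
          rw [beq_eq_false_iff_ne]
          intro h
          apply hs
          have : (((Nat.sqrt t + 1) * (Nat.sqrt t + 1) : Nat) : Int) = ((t + 1 : Nat) : Int) := by
            push_cast; linarith
          exact_mod_cast this
        rw [hcond]
        simp only [Bool.false_eq_true, if_false]
        have hsq : Nat.sqrt (t + 1) = Nat.sqrt t := by
          have hle : Nat.sqrt t ≤ Nat.sqrt (t + 1) := Nat.sqrt_le_sqrt (by omega)
          have hlt : Nat.sqrt (t + 1) < Nat.sqrt t + 1 := by
            rw [Nat.sqrt_lt', Nat.pow_two]; omega
          omega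
        have hrefl : pvRef t = "off" := by
          unfold pvRef; rw [if_neg]; rw [hsq]; omega
        rw [hsq, hrefl]

lemma B_eq_ref (n : Int) : anda_corredor_alt n = pvRefList n.toNat := by
  unfold anda_corredor_alt
  rw [PySem.List.pyRange_one]
  have h1 : (n + 1 - 1).toNat = n.toNat := by omega
  rw [h1, B_inv n.toNat]
  rfl

-- ===== VERDICT (by name: the statement is the Claim_ definition above) =====
theorem anda_corredor_spec : Claim_equal_anda_corredor := by
  intro n _
  unfold Spec_anda_corredor
  rw [A_eq_ref, B_eq_ref]
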